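-- pv_equiv track=rewrite | github.com/pro465/research | minimal_sum_set.py | nonhit
-- ===== SOURCE A (Python) =====
-- def nonhit(n, sol):
--     for i in range(n+1):
--         b=False
--         for idx,j in enumerate(sol):
--             for k in sol[idx:]:
--                 if i==j+k:
--                     b=True
--                     break
--             if b: break
--         if not b: return False
--     return True
-- ===== SOURCE B (Python) =====
-- def nonhit(n, sol):
--     sums = set()
--     for a in sol:
--         for b in sol:
--             sums.add(a + b)
--     return all(i in sums for i in range(n + 1))
-- ===== Notes on version B (the rewrite author's own statement) =====
-- stated objective: faster
-- what changed: Inverted traversal: instead of rescanning all pairs for each target i in 0..n, B builds the set of all pairwise sums once and then checks each i by a hash lookup.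
import Mathlib
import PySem

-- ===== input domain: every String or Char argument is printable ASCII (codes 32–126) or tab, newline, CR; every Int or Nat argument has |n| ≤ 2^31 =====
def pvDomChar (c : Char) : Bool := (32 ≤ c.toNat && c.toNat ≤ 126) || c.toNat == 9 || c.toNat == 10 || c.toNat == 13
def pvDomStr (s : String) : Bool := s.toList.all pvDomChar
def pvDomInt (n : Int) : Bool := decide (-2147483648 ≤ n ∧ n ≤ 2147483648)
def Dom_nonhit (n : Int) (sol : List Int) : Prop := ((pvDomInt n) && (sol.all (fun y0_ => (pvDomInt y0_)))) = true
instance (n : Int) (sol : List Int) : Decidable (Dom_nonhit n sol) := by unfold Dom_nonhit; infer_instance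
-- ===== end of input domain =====

-- B inverts the traversal: it builds the set of all pairwise sums once and then
-- checks each target i in 0..n by membership, instead of A's per-target pair rescans.

-- ===== PORT A =====
-- 'for k in sol[idx:]: if i==j+k: b=True; break' — returns on first hit
def innerA (i j : Int) : List Int → Bool
  | [] => false
  | k :: rest => if i == j + k then true else innerA i j rest

-- 'for idx,j in enumerate(sol): …; if b: break'
def midA (i : Int) (sol : List Int) : List (Int × Int) → Bool
  | [] => false
  | (idx, j) :: rest =>
      if innerA i j (PySem.List.slice sol (some idx) none) then true else midA i sol rest

-- 'for i in range(n+1): … if not b: return False' / final 'return True'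
def outerA (sol : List Int) : List Int → Bool
  | [] => true
  | i :: rest => if midA i sol (PySem.List.enumerate sol 0) then outerA sol rest else false

def nonhit (n : Int) (sol : List Int) : Bool :=
  outerA sol (PySem.List.pyRange 0 (n + 1) 1)

-- ===== PORT B =====
-- 'sums = set(); for a in sol: for b in sol: sums.add(a + b)'
def sumsB (sol : List Int) : PySem.Set Int :=
  sol.foldl (fun acc a => sol.foldl (fun acc2 b => PySem.Set.add acc2 (a + b)) acc) PySem.Set.empty

-- 'return all(i in sums for i in range(n + 1))'
def nonhit_alt (n : Int) (sol : List Int) : Bool :=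
  (PySem.List.pyRange 0 (n + 1) 1).all (fun i => PySem.Set.contains (sumsB sol) i)

-- ===== PRECONDITION & SPEC =====
def Spec_nonhit (n : Int) (sol : List Int) (out : Bool) : Prop := out = nonhit_alt n sol
instance (n : Int) (sol : List Int) (out : Bool) : Decidable (Spec_nonhit n sol out) := by unfold Spec_nonhit; infer_instance

-- ===== CLAIM (what is proved, stated in full; the proofs are below) =====
def Claim_equal_nonhit : Prop := ∀ (n : Int) (sol : List Int), Dom_nonhit n sol → Spec_nonhit n sol (nonhit n sol)

-- ===== LEMMAS AND PROOFS =====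

theorem innerA_iff (i j : Int) (l : List Int) :
    innerA i j l = true ↔ ∃ k ∈ l, i = j + k := by
  induction l with
  | nil => simp [innerA]
  | cons k rest ih =>
      simp only [innerA]
      by_cases h : i = j + k
      · simp [h]
      · have : (i == j + k) = false := by simp [h]
        simp [this, ih, h]

theorem midA_iff (i : Int) (sol : List Int) (pairs : List (Int × Int)) :
    midA i sol pairs = true ↔
      ∃ p ∈ pairs, ∃ k ∈ PySem.List.slice sol (some p.1) none, i = p.2 + k := by
  induction pairs with
  | nil => simp [midA]
  | cons p rest ih =>
      obtain ⟨idx, j⟩ := p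
      simp only [midA]
      by_cases h : innerA i j (PySem.List.slice sol (some idx) none) = true
      · rw [innerA_iff] at h
        obtain ⟨k, hk, hik⟩ := h
        simp only [if_pos (innerA_iff i j _ |>.mpr ⟨k, hk, hik⟩)]
        constructor
        · intro _; exact ⟨(idx, j), by simp, k, hk, hik⟩
        · intro _; trivial
      · rw [if_neg h, ih]
        rw [innerA_iff] at h
        push Not at h
        constructor
        · rintro ⟨p, hp, k, hk, hik⟩; exact ⟨p, by simp [hp], k, hk, hik⟩
        · rintro ⟨p, hp, k, hk, hik⟩
          rcases List.mem_cons.mp hp with h1 | h1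
          · subst h1; exact absurd hik (h k hk)
          · exact ⟨p, h1, k, hk, hik⟩

-- A's per-target search succeeds iff i is a pairwise sum of sol
theorem midA_enumerate_iff (i : Int) (sol : List Int) :
    midA i sol (PySem.List.enumerate sol 0) = true ↔
      ∃ a ∈ sol, ∃ b ∈ sol, i = a + b := by
  rw [midA_iff]
  constructor
  · rintro ⟨p, hp, k, hk, hik⟩
    rw [PySem.List.mem_enumerate_iff] at hp
    obtain ⟨m, hm, rfl⟩ := hp
    refine ⟨sol[m], List.getElem_mem hm, k, ?_, hik⟩
    exact PySem.List.mem_of_mem_slice sol (some (0 + (m:Int), sol[m]).1) none hk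
  · rintro ⟨a, ha, b, hb, rfl⟩
    obtain ⟨p, hp, rfl⟩ := List.getElem_of_mem ha
    obtain ⟨q, hq, rfl⟩ := List.getElem_of_mem hb
    rcases le_or_gt p q with hpq | hpq
    · refine ⟨((p : Int), sol[p]), ?_, sol[q], ?_, rfl⟩
      · rw [PySem.List.mem_enumerate_iff]; exact ⟨p, hp, by simp⟩
      · rw [show ((p : Int) : Int) = ((p : Nat) : Int) from rfl,
          PySem.List.slice_from_natCast]
        have hlen : q - p < (sol.drop p).length := by simp [List.length_drop]; omega
        have hg := List.getElem_drop (i := p) (j := q - p) (xs := sol) (h := hlen)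
        simp only [Nat.add_sub_cancel' hpq] at hg
        have hm := List.getElem_mem hlen
        rw [hg] at hm
        exact hm
    · refine ⟨((q : Int), sol[q]), ?_, sol[p], ?_, by ring⟩
      · rw [PySem.List.mem_enumerate_iff]; exact ⟨q, hq, by simp⟩
      · rw [show ((q : Int) : Int) = ((q : Nat) : Int) from rfl,
          PySem.List.slice_from_natCast]
        have hlen : p - q < (sol.drop q).length := by simp [List.length_drop]; omega
        have hg := List.getElem_drop (i := q) (j := p - q) (xs := sol) (h := hlen)
        simp only [Nat.add_sub_cancel' (Nat.le_of_lt hpq)] at hg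
        have hm := List.getElem_mem hlen
        rw [hg] at hm
        exact hm

theorem mem_inner_fold (i a : Int) (l : List Int) (acc : PySem.Set Int) :
    i ∈ l.foldl (fun acc2 b => PySem.Set.add acc2 (a + b)) acc ↔
      i ∈ acc ∨ ∃ b ∈ l, i = a + b := by
  induction l generalizing acc with
  | nil => simp
  | cons b rest ih =>
      simp only [List.foldl_cons, ih, PySem.Set.mem_add]
      constructor
      · rintro (⟨h | h⟩ | h)
        · exact Or.inl h
        · exact Or.inr ⟨b, by simp, h⟩
        · obtain ⟨c, hc, hic⟩ := h; exact Or.inr ⟨c, by simp [hc], hic⟩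
      · rintro (h | ⟨c, hc, hic⟩)
        · exact Or.inl (Or.inl h)
        · rcases List.mem_cons.mp hc with h1 | h1
          · subst h1; exact Or.inl (Or.inr hic)
          · exact Or.inr ⟨c, h1, hic⟩

theorem mem_sumsB_fold (i : Int) (sol l : List Int) (acc : PySem.Set Int) :
    i ∈ l.foldl (fun acc a => sol.foldl (fun acc2 b => PySem.Set.add acc2 (a + b)) acc) acc ↔
      i ∈ acc ∨ ∃ a ∈ l, ∃ b ∈ sol, i = a + b := by
  induction l generalizing acc with
  | nil => simp
  | cons a rest ih =>
      simp only [List.foldl_cons, ih, mem_inner_fold]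
      constructor
      · rintro ((h | h) | h)
        · exact Or.inl h
        · obtain ⟨b, hb, hib⟩ := h; exact Or.inr ⟨a, by simp, b, hb, hib⟩
        · obtain ⟨c, hc, rest'⟩ := h; exact Or.inr ⟨c, by simp [hc], rest'⟩
      · rintro (h | ⟨c, hc, b, hb, hib⟩)
        · exact Or.inl (Or.inl h)
        · rcases List.mem_cons.mp hc with h1 | h1
          · subst h1; exact Or.inl (Or.inr ⟨b, hb, hib⟩)
          · exact Or.inr ⟨c, h1, b, hb, hib⟩

theorem contains_sumsB (i : Int) (sol : List Int) :
    PySem.Set.contains (sumsB sol) i = true ↔ ∃ a ∈ sol, ∃ b ∈ sol, i = a + b := by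
  have : PySem.Set.contains (sumsB sol) i = true ↔ i ∈ sumsB sol := by
    simp [PySem.Set.contains]
  rw [this, sumsB, mem_sumsB_fold]
  simp [PySem.Set.empty]

theorem pointwise (i : Int) (sol : List Int) :
    midA i sol (PySem.List.enumerate sol 0) = PySem.Set.contains (sumsB sol) i := by
  rw [Bool.eq_iff_iff, midA_enumerate_iff, contains_sumsB]

theorem outerA_eq_all (sol : List Int) (l : List Int) :
    outerA sol l = l.all (fun i => midA i sol (PySem.List.enumerate sol 0)) := by
  induction l with
  | nil => rfl
  | cons i rest ih =>
      simp only [outerA, List.all_cons]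
      by_cases h : midA i sol (PySem.List.enumerate sol 0) = true
      · simp [h, ih]
      · simp [Bool.eq_false_iff.mpr h]

-- ===== VERDICT (by name: the statement is the Claim_ definition above) =====
theorem nonhit_spec : Claim_equal_nonhit := by
  intro n sol _
  unfold Spec_nonhit nonhit nonhit_alt
  rw [outerA_eq_all]
  have : (fun i => midA i sol (PySem.List.enumerate sol 0))
       = fun i => PySem.Set.contains (sumsB sol) i := funext fun i => pointwise i sol
  rw [this]
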